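-- pv_equiv track=rewrite | github.com/eroicaleo/LearningPython | interview/leet/394_Decode_String.py | decodeString_iter2
-- ===== SOURCE A (Python) =====
-- def decodeString_iter2(s):
--     stack = []
--     n, t = 0, ''
--     for c in s:
--         if c.isdigit():
--             n = 10*n+int(c)
--         elif c.isalpha():
--             t += c
--         elif c == '[':
--             stack += [n, t]
--             n, t = 0, ''
--         elif c == ']':
--             t, n = stack.pop()+stack.pop()*t, 0
--     return t
-- ===== SOURCE B (Python) =====
-- def decodeString_iter2(s):
--     # Recursive-descent decoder with a shared index: each level accumulates
--     # parts; digits build a count, '[' recurses and appends count * inner,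
--     # ']' (or end of input) terminates the level.
--     def go(i):
--         n = 0
--         parts = []
--         while i < len(s):
--             c = s[i]
--             if c.isdigit():
--                 n = 10 * n + int(c)
--                 i += 1
--             elif c == '[':
--                 inner, i = go(i + 1)
--                 parts.append(n * inner)
--                 n = 0
--             elif c == ']':
--                 return ''.join(parts), i + 1
--             else:
--                 if c.isalpha():
--                     parts.append(c)
--                 i += 1
--         return ''.join(parts), i
--     return go(0)[0]
-- ===== Notes on version B (the rewrite author's own statement) =====
-- stated objective: alternative
-- what changed: Replaced the explicit-stack single loop (pushing/popping count,text pairs on brackets) by a recursive-descent parser with a shared index: each nesting level is decoded by a recursive call that returns the decoded segment and the resume position.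
-- outside the precondition, e.g. on decodeString_iter2('a[b'): A returns 'b', B returns 'a'; on decodeString_iter2('2[a'): A returns 'a', B returns 'aa'; on decodeString_iter2('['): A returns '', B returns ''
import Mathlib
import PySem

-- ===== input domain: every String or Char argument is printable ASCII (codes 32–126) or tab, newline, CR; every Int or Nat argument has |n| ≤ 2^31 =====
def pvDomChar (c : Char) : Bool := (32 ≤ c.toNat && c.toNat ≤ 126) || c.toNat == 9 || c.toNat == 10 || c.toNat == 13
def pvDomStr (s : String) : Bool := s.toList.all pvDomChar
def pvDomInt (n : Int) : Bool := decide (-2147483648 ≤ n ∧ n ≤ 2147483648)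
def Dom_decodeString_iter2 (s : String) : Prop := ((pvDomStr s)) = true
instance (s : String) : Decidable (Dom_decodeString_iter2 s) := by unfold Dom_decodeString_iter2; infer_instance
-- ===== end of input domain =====

-- B replaces A's explicit-stack loop by a recursive-descent parser with a shared
-- position (alternative decomposition, same cost); equal on bracket-balanced inputs (Pre_).


-- Python's  n * t  on an int and a string (empty for n ≤ 0); shared string primitive.
def pvRep (n : Int) (t : String) : String := String.mk ((List.replicate n.toNat t.toList).flatten)

-- ===== PORT A =====
-- A's flat stack alternates pushed counts and texts (stack += [n, t]; two pops per ']'),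
-- modelled as a list of (count, text) pairs with the top at the head.
def stepA (acc : List (Int × String) × Int × String) (c : Char) : List (Int × String) × Int × String :=
  let (stack, n, t) := acc
  if c.isDigit then (stack, 10 * n + ((c.toNat : Int) - 48), t)
  else if c.isAlpha then (stack, n, t.push c)
  else if c = '[' then ((n, t) :: stack, 0, "")
  else if c = ']' then
    match stack with
    | (pn, pt) :: rest => (rest, 0, pt ++ pvRep pn t)
    | [] => (stack, n, t)   -- Python raises IndexError here; excluded by Pre_
  else (stack, n, t)

def decodeString_iter2 (s : String) : String :=
  (s.toList.foldl stepA ([], 0, "")).2.2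

-- ===== PORT B =====
-- Source B's recursive go(i): here the yet-unread suffix replaces the index i, and the
-- fuel argument (initially the whole length, enough since each call consumes input)
-- only makes the recursion structural.
def altGoF : Nat → List Char → Int → String → String × List Char
  | _, [], _, t => (t, [])
  | 0, _ :: _, _, t => (t, [])   -- fuel exhausted: unreachable when fuel ≥ length
  | f + 1, c :: rest, n, t =>
    if c.isDigit then altGoF f rest (10 * n + ((c.toNat : Int) - 48)) t
    else if c = '[' then
      let (inner, rest') := altGoF f rest 0 ""
      altGoF f rest' 0 (t ++ pvRep n inner)
    else if c = ']' then (t, rest)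
    else if c.isAlpha then altGoF f rest n (t.push c)
    else altGoF f rest n t

def decodeString_iter2_alt (s : String) : String :=
  (altGoF s.toList.length s.toList 0 "" ).1

-- ===== PRECONDITION & SPEC =====
-- Pre_ excludes strings whose square brackets are unbalanced: on an unmatched ']' A
-- raises IndexError, and on an unmatched '[' the input is malformed and A's and B's
-- recovery values are both accidental, equally defensible choices.
def Pre_decodeString_iter2 (s : String) : Prop :=
  (∀ i ∈ List.range (s.toList.length + 1),
      (s.toList.take i).count ']' ≤ (s.toList.take i).count '[') ∧
  s.toList.count '[' = s.toList.count ']'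
instance (s : String) : Decidable (Pre_decodeString_iter2 s) := by
  unfold Pre_decodeString_iter2; infer_instance

def pvWitness_decodeString_iter2 : String := "2[a3[b]c]"

def Spec_decodeString_iter2 (s : String) (out : String) : Prop := out = decodeString_iter2_alt s
instance (s : String) (out : String) : Decidable (Spec_decodeString_iter2 s out) := by unfold Spec_decodeString_iter2; infer_instance

-- ===== CLAIM (what is proved, stated in full; the proofs are below) =====
def Claim_equal_decodeString_iter2 : Prop := ∀ (s : String), Dom_decodeString_iter2 s → Pre_decodeString_iter2 s → Spec_decodeString_iter2 s (decodeString_iter2 s)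

-- ===== LEMMAS AND PROOFS =====

-- bracket depth of a list of chars
def pvDep : List Char → Int
  | [] => 0
  | c :: cs => (if c = '[' then 1 else if c = ']' then -1 else 0) + pvDep cs

-- "no prefix underflows": every ']' is seen at positive depth, starting from d
def pvOk : List Char → Int → Bool
  | [], _ => true
  | c :: cs, d =>
    if c = '[' then pvOk cs (d + 1)
    else if c = ']' then decide (0 < d) && pvOk cs (d - 1)
    else pvOk cs d

def pvBal (cs : List Char) : Prop := pvOk cs 0 = true ∧ pvDep cs = 0

-- the count accumulator after a segment (identical in A and B)
def pvNA : List Char → Int → Int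
  | [], n => n
  | c :: cs, n =>
    if c.isDigit then pvNA cs (10 * n + ((c.toNat : Int) - 48))
    else if c = '[' then pvNA cs 0
    else if c = ']' then pvNA cs 0
    else pvNA cs n

-- B with canonical fuel
def pvGo (cs : List Char) (n : Int) (t : String) : String × List Char :=
  altGoF cs.length cs n t

lemma pvDep_append (a b : List Char) : pvDep (a ++ b) = pvDep a + pvDep b := by
  induction a with
  | nil => simp [pvDep]
  | cons c a ih => simp [pvDep, ih]; ring

lemma pvNA_append (a b : List Char) (n : Int) : pvNA (a ++ b) n = pvNA b (pvNA a n) := by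
  induction a generalizing n with
  | nil => simp [pvNA]
  | cons c a ih => simp only [List.cons_append, pvNA]; split_ifs <;> apply ih

lemma pvDep_counts (cs : List Char) :
    pvDep cs = (cs.count '[' : Int) - (cs.count ']' : Int) := by
  induction cs with
  | nil => simp [pvDep]
  | cons c cs ih =>
    simp only [pvDep, List.count_cons, ih]
    by_cases h1 : c = '[' <;> by_cases h2 : c = ']' <;>
      simp [h1, h2] <;> push_cast <;> omega

lemma pvOk_of_prefix (cs : List Char) (d : Int)
    (h : ∀ k : Nat, 0 ≤ d + pvDep (cs.take k)) : pvOk cs d = true := by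
  induction cs generalizing d with
  | nil => simp [pvOk]
  | cons c cs ih =>
    have htail : ∀ k : Nat, 0 ≤ (d + pvDep [c]) + pvDep (cs.take k) := by
      intro k
      have := h (k + 1)
      simp only [List.take_succ_cons, pvDep] at this ⊢
      omega
    simp only [pvOk]
    split_ifs with h1 h2
    · have := ih (d := d + 1); simp [pvDep, h1] at htail; exact this (by intro k; have := htail k; omega)
    · simp only [Bool.and_eq_true, decide_eq_true_eq]
      constructor
      · have := h 1; simp [pvDep, h2, h1] at this; omega
      · have := ih (d := d - 1); simp [pvDep, h2, h1] at htail
        exact this (by intro k; have := htail k; omega)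
    · have := ih (d := d); simp [pvDep, h1, h2] at htail
      exact this (by intro k; have := htail k; omega)

-- first ']' returning to the base depth splits the tail
lemma pvSplit (tl : List Char) (d : Int) (hd : 0 ≤ d)
    (hok : pvOk tl (d + 1) = true) (hdep : pvDep tl < -d) :
    ∃ inner rest, tl = inner ++ ']' :: rest ∧ pvDep inner = -d ∧
      (∀ k : Nat, -d ≤ pvDep (inner.take k)) ∧ pvOk rest 0 = true := by
  induction tl generalizing d with
  | nil => simp [pvDep] at hdep; omega
  | cons c tl ih =>
    by_cases h1 : c = '['
    · subst h1
      simp [pvOk] at hok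
      simp [pvDep] at hdep
      obtain ⟨i, r, heq, hdi, hpre, hr⟩ := ih (d := d + 1)
        (by omega) (by rw [show d + 1 + 1 = 1 + (d + 1) by ring] at hok ⊢; exact hok) (by omega)
      refine ⟨'[' :: i, r, by simp [heq], ?_, ?_, hr⟩
      · simp [pvDep, hdi] <;> omega
      · intro k
        cases k with
        | zero => simp [pvDep]; omega
        | succ k => have := hpre k; simp [pvDep]; omega
    · by_cases h2 : c = ']'
      · subst h2
        simp [pvOk] at hok
        simp [pvDep] at hdep
        rcases hok with ⟨hpos, hok⟩
        by_cases hd0 : d = 0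
        · subst hd0
          refine ⟨[], tl, by simp, by simp [pvDep], by intro k; simp [pvDep], ?_⟩
          simpa using hok
        · have hd1 : (0:Int) ≤ d - 1 := by omega
          obtain ⟨i, r, heq, hdi, hpre, hr⟩ := ih (d := d - 1) hd1
            (by rw [show d - 1 + 1 = d by ring]; simpa using hok) (by omega)
          refine ⟨']' :: i, r, by simp [heq], ?_, ?_, hr⟩
          · simp [pvDep, hdi] <;> omega
          · intro k
            cases k with
            | zero => simp [pvDep]; omega
            | succ k => have := hpre k; simp [pvDep]; omega
      · simp only [pvOk, if_neg h1, if_neg h2] at hok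
        simp [pvDep, h1, h2] at hdep
        obtain ⟨i, r, heq, hdi, hpre, hr⟩ := ih (d := d) hd hok (by omega)
        refine ⟨c :: i, r, by simp [heq], ?_, ?_, hr⟩
        · simp [pvDep, h1, h2, hdi]
        · intro k
          cases k with
          | zero => simp [pvDep]; omega
          | succ k => have := hpre k; simp [pvDep, h1, h2]; omega

lemma altGoF_len (f : Nat) (cs : List Char) (n : Int) (t : String) :
    (altGoF f cs n t).2.length ≤ cs.length := by
  induction f generalizing cs n t with
  | zero => cases cs <;> simp [altGoF]
  | succ f ih =>
    cases cs with
    | nil => simp [altGoF]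
    | cons c rest =>
      simp only [altGoF]
      split_ifs with h1 h2 h3 h4
      · exact le_trans (ih ..) (by simp)
      · have h := ih rest 0 ""
        have h2' := ih (altGoF f rest 0 "").2 0 (t ++ pvRep n (altGoF f rest 0 "").1)
        calc (altGoF f (altGoF f rest 0 "").2 0 (t ++ pvRep n (altGoF f rest 0 "").1)).2.length
            ≤ (altGoF f rest 0 "").2.length := h2'
          _ ≤ rest.length := h
          _ ≤ (c :: rest).length := by simp
      · simp
      · exact le_trans (ih ..) (by simp)
      · exact le_trans (ih ..) (by simp)

lemma altGoF_irrel (f : Nat) (g : Nat) (cs : List Char) (n : Int) (t : String)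
    (hf : cs.length ≤ f) (hg : cs.length ≤ g) : altGoF f cs n t = altGoF g cs n t := by
  induction f generalizing g cs n t with
  | zero => cases cs with
    | nil => cases g <;> simp [altGoF]
    | cons c r => simp at hf
  | succ f ih =>
    cases cs with
    | nil => cases g <;> simp [altGoF]
    | cons c rest =>
      cases g with
      | zero => simp at hg
      | succ g =>
        simp only [List.length_cons, Nat.succ_le_succ_iff] at hf hg
        simp only [altGoF]
        split_ifs with h1 h2 h3 h4
        · exact ih g rest _ t hf hg
        · have e1 : altGoF f rest 0 "" = altGoF g rest 0 "" := ih g rest 0 "" hf hg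
          rw [e1]
          exact ih g _ 0 _ (le_trans (e1 ▸ altGoF_len f rest 0 "") hf)
            (le_trans (altGoF_len g rest 0 "") hg)
        · rfl
        · exact ih g rest n _ hf hg
        · exact ih g rest n t hf hg

-- the master invariant: on a balanced segment, B's parser composes and A's fold
-- leaves the stack alone and produces B's text
lemma pvMaster (N : Nat) : ∀ cs : List Char, cs.length ≤ N → pvBal cs →
    (∀ cs2 n t, pvGo (cs ++ cs2) n t = pvGo cs2 (pvNA cs n) ((pvGo cs n t).1)) ∧
    (∀ (st : List (Int × String)) n t,
        cs.foldl stepA (st, n, t) = (st, pvNA cs n, (pvGo cs n t).1)) := by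
  induction N with
  | zero =>
    intro cs hlen _
    have : cs = [] := by cases cs <;> simp_all
    subst this
    constructor
    · intro cs2 n t; simp [pvGo, pvNA, altGoF]
    · intro st n t; simp [pvGo, pvNA, altGoF]
  | succ N ih =>
    intro cs hlen hbal
    cases cs with
    | nil =>
      constructor
      · intro cs2 n t; simp [pvGo, pvNA, altGoF]
      · intro st n t; simp [pvGo, pvNA, altGoF]
    | cons c tl =>
      by_cases h1 : c = '['
      · -- bracket case: split tl = inner ++ ']' :: rest
        subst h1
        obtain ⟨hok, hdep⟩ := hbal
        simp [pvOk] at hok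
        simp [pvDep] at hdep
        obtain ⟨inner, rest, heq, hdi, hpre, hrok⟩ :=
          pvSplit tl 0 (by omega) (by simpa using hok) (by omega)
        subst heq
        have hbi : pvBal inner := by
          constructor
          · exact pvOk_of_prefix inner 0 (by intro k; have := hpre k; omega)
          · omega
        have hbr : pvBal rest := by
          constructor
          · simpa using hrok
          · have := pvDep_append inner (']' :: rest)
            simp [pvDep] at this; omega
        have hli : inner.length ≤ N := by simp at hlen; omega
        have hlr : rest.length ≤ N := by simp at hlen; omega
        obtain ⟨ihiG, ihiF⟩ := ih inner hli hbi
        obtain ⟨ihrG, ihrF⟩ := ih rest hlr hbr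
        -- one evaluated step of B on '[' :: (inner ++ ']' :: rest ++ cs2)
        have stepB : ∀ cs2 n t,
            pvGo ('[' :: (inner ++ ']' :: rest) ++ cs2) n t =
              pvGo cs2 (pvNA rest 0) ((pvGo rest 0 (t ++ pvRep n ((pvGo inner 0 "").1))).1) := by
          intro cs2 n t
          have hBody : '[' :: (inner ++ ']' :: rest) ++ cs2 =
              '[' :: (inner ++ ']' :: (rest ++ cs2)) := by simp
          rw [hBody]
          show altGoF ('[' :: (inner ++ ']' :: (rest ++ cs2))).length _ n t = _
          simp only [List.length_cons, altGoF, if_neg (by decide : ¬ ('[' : Char).isDigit = true)]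
          have hfuel : (inner ++ ']' :: (rest ++ cs2)).length ≤ (inner ++ ']' :: (rest ++ cs2)).length := le_refl _
          rw [show altGoF (inner ++ ']' :: (rest ++ cs2)).length (inner ++ ']' :: (rest ++ cs2)) 0 "" =
                pvGo (inner ++ ']' :: (rest ++ cs2)) 0 "" from rfl]
          rw [ihiG (']' :: (rest ++ cs2)) 0 ""]
          have hstop : pvGo (']' :: (rest ++ cs2)) (pvNA inner 0) ((pvGo inner 0 "").1) =
              ((pvGo inner 0 "").1, rest ++ cs2) := by
            simp [pvGo, altGoF]
          rw [hstop]
          have hlen2 : (rest ++ cs2).length ≤ (inner ++ ']' :: (rest ++ cs2)).length := by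
            simp; omega
          rw [altGoF_irrel _ (rest ++ cs2).length _ _ _ hlen2 (le_refl _)]
          exact ihrG cs2 0 _
        constructor
        · intro cs2 n t
          rw [stepB cs2 n t]
          -- compute RHS pieces
          have hn : pvNA ('[' :: (inner ++ ']' :: rest)) n = pvNA rest 0 := by
            simp only [pvNA, if_neg (by decide : ¬ ('[' : Char).isDigit = true)]
            rw [pvNA_append]
            simp [pvNA]
          have ht : (pvGo ('[' :: (inner ++ ']' :: rest)) n t).1 =
              (pvGo rest 0 (t ++ pvRep n ((pvGo inner 0 "").1))).1 := by
            have := stepB [] n t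
            simp only [List.append_nil] at this
            rw [this]
            have : pvGo [] (pvNA rest 0) ((pvGo rest 0 (t ++ pvRep n ((pvGo inner 0 "").1))).1) =
                ((pvGo rest 0 (t ++ pvRep n ((pvGo inner 0 "").1))).1, []) := by
              simp [pvGo, altGoF]
            rw [this]
          rw [hn, ht]
        · intro st n t
          have hA : ('[' :: (inner ++ ']' :: rest)).foldl stepA (st, n, t) =
              rest.foldl stepA (st, 0, t ++ pvRep n ((pvGo inner 0 "").1)) := by
            simp only [List.foldl_cons, List.foldl_append]
            have s1 : stepA (st, n, t) '[' = ((n, t) :: st, 0, "") := by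
              simp [stepA]
            rw [s1, ihiF ((n, t) :: st) 0 ""]
            have s2 : stepA ((n, t) :: st, pvNA inner 0, (pvGo inner 0 "").1) ']' =
                (st, 0, t ++ pvRep n ((pvGo inner 0 "").1)) := by
              simp [stepA]
            rw [s2]
          rw [hA, ihrF st 0 _]
          -- align with the claimed RHS
          have hn : pvNA ('[' :: (inner ++ ']' :: rest)) n = pvNA rest 0 := by
            simp only [pvNA, if_neg (by decide : ¬ ('[' : Char).isDigit = true)]
            rw [pvNA_append]; simp [pvNA]
          have ht : (pvGo ('[' :: (inner ++ ']' :: rest)) n t).1 =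
              (pvGo rest 0 (t ++ pvRep n ((pvGo inner 0 "").1))).1 := by
            have := stepB [] n t
            simp only [List.append_nil] at this
            rw [this]
            simp [pvGo, altGoF]
          rw [hn, ht]
      · by_cases h2 : c = ']'
        · exfalso
          obtain ⟨hok, _⟩ := hbal
          subst h2
          simp [pvOk] at hok
        · -- plain character: one step, then the IH on tl
          obtain ⟨hok, hdep⟩ := hbal
          have hbt : pvBal tl := by
            constructor
            · simpa [pvOk, h1, h2] using hok
            · simp only [pvDep, if_neg h1, if_neg h2] at hdep; omega
          obtain ⟨ihG, ihF⟩ := ih tl (by simp at hlen; omega) hbt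
          have hstep : ∀ cs2 n t, pvGo ((c :: tl) ++ cs2) n t =
              if c.isDigit then pvGo (tl ++ cs2) (10 * n + ((c.toNat : Int) - 48)) t
              else if c.isAlpha then pvGo (tl ++ cs2) n (t.push c)
              else pvGo (tl ++ cs2) n t := by
            intro cs2 n t
            show altGoF ((c :: tl) ++ cs2).length _ n t = _
            simp only [List.cons_append, List.length_cons, altGoF, if_neg h1, if_neg h2]
            split_ifs with hd ha <;> rfl
          have hstep1 : ∀ n t, pvGo (c :: tl) n t =
              if c.isDigit then pvGo tl (10 * n + ((c.toNat : Int) - 48)) t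
              else if c.isAlpha then pvGo tl n (t.push c)
              else pvGo tl n t := by
            intro n t
            have := hstep [] n t
            simpa using this
          have hnstep : ∀ n, pvNA (c :: tl) n =
              if c.isDigit then pvNA tl (10 * n + ((c.toNat : Int) - 48)) else pvNA tl n := by
            intro n
            simp only [pvNA, if_neg h1, if_neg h2]
          constructor
          · intro cs2 n t
            rw [hstep cs2 n t, hstep1 n t, hnstep n]
            split_ifs with hd ha
            · exact ihG cs2 _ t
            · exact ihG cs2 n _
            · exact ihG cs2 n t
          · intro st n t
            have s1 : stepA (st, n, t) c =
                if c.isDigit then (st, 10 * n + ((c.toNat : Int) - 48), t)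
                else if c.isAlpha then (st, n, t.push c)
                else (st, n, t) := by
              simp only [stepA, if_neg h1, if_neg h2]
            rw [List.foldl_cons, s1, hstep1 n t, hnstep n]
            split_ifs with hd ha
            · exact ihF st _ t
            · exact ihF st n _
            · exact ihF st n t

lemma pre_bal (s : String) (h : Pre_decodeString_iter2 s) : pvBal s.toList := by
  obtain ⟨hpre, htot⟩ := h
  constructor
  · apply pvOk_of_prefix
    intro k
    rw [pvDep_counts]
    by_cases hk : k ≤ s.toList.length
    · have := hpre k (List.mem_range.mpr (by omega))
      omega
    · have : s.toList.take k = s.toList := List.take_of_length_le (by omega)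
      rw [this]; omega
  · rw [pvDep_counts]; omega

-- ===== VERDICT (by name: the statement is the Claim_ definition above) =====
theorem decodeString_iter2_spec : Claim_equal_decodeString_iter2 := by
  intro s _ hpre
  unfold Spec_decodeString_iter2 decodeString_iter2 decodeString_iter2_alt
  have hbal := pre_bal s hpre
  obtain ⟨_, hF⟩ := pvMaster s.toList.length s.toList (le_refl _) hbal
  rw [hF [] 0 ""]
  rfl
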